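-- pv_equiv track=rewrite | github.com/vidigummy/python-algorithm | TEST/second.py | checkCanChange
-- ===== SOURCE A (Python) =====
-- from itertools import product
--
-- def checkCanChange(now, targetList, dotList, canChange, k):
--     canChangeLen = (len(now), len(now)-len(dotList)+len(dotList)*k)
--     cnt = 0
--     for target in targetList:
--         if(len(target)>= canChangeLen[0] and len(target)<= canChangeLen[1]):
--             cnt += 1
--     if cnt <= 0:
--         return False
--
--     cnt =0
--     exceptDotList = now.split('.')
--     if len(exceptDotList) > 0:
--         for exceptDot in exceptDotList:
--             for target in targetList:
--                 if(exceptDot in target):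
--                     cnt += 1
--         if cnt <= 0:
--             return False
--
--     canChangeList = product(canChange, repeat=len(dotList))
--     for i in canChangeList:
--         canChangeWord = list(now)
--         for j in range(len(dotList)):
--             canChangeWord[dotList[j]] = i[j]
--         changedWord = ''.join(canChangeWord)
--         if changedWord in targetList:
--             return True
--     return False
-- ===== SOURCE B (Python) =====
-- def checkCanChange(now, targetList, dotList, canChange, k):
--     n = len(now)
--     L = len(dotList)
--     if not any(n <= len(t) <= n - L + L * k for t in targetList):
--         return False
--     if not any(piece in t for piece in now.split('.') for t in targetList):
--         return False
--     dots = set(dotList)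
--     letters = set(canChange)
--     return any(
--         len(t) == n and all(
--             t[i] in letters if i in dots else t[i] == now[i]
--             for i in range(n)
--         )
--         for t in targetList
--     )
-- ===== Notes on version B (the rewrite author's own statement) =====
-- stated objective: alternative
-- what changed: A enumerates all |canChange|^|dotList| dot substitutions of `now` (itertools.product) and tests each against targetList; B keeps the two pre-filters but then checks each target directly, position by position (non-dot positions must equal `now`, dot positions must lie in the canChange set); Pre_ restricts dot positions to the natural domain [0, len(now)): outside it A raises IndexError on any substitution it actually attempts, and on in-range negative positions A's value comes from list negative-index wraparound, not a dot position of `now`.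
-- outside the precondition, e.g. on checkCanChange('a.c', ['abc'], [-2], 'b', 1): A returns True, B returns False; on checkCanChange('ab', ['ab'], [5], '', 1): A returns False, B returns True
import Mathlib
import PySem

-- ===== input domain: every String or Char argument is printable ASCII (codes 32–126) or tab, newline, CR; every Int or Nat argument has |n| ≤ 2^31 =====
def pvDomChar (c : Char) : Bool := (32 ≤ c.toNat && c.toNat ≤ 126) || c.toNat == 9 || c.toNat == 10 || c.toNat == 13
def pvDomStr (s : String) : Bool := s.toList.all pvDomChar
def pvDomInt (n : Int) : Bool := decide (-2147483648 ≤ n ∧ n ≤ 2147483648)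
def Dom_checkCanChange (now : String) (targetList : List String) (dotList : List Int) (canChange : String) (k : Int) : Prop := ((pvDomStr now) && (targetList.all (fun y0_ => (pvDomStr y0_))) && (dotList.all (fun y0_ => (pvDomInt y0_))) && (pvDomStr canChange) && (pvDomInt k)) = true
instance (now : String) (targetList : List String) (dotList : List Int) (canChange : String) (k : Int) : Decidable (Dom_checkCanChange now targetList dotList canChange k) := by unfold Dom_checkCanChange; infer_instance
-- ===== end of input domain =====

-- B replaces A's enumeration of all dot substitutions (itertools.product) by a per-target positional
-- check (non-dot positions must equal `now`, dot positions must lie in the canChange set), keeping A's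
-- two pre-filters; Pre_ restricts dot positions to [0, len(now)).

-- ===== PORT A =====
-- itertools.product(canChange, repeat=r): tuples in lexicographic order (first component varies slowest)
def pvProdRep (cs : List Char) : Nat → List (List Char)
  | 0 => [[]]
  | r + 1 => cs.flatMap (fun c => (pvProdRep cs r).map (fun t => c :: t))

-- the inner 'for j in range(len(dotList)): canChangeWord[dotList[j]] = i[j]' loop; none = IndexError
def pvSubstA : List Char → List Int → List Char → Option (List Char)
  | w, [], _ => some w
  | w, _ :: _, [] => some w
  | w, d :: ds, c :: cs =>
    match PySem.List.pySet? w d c with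
    | none => none
    | some w' => pvSubstA w' ds cs

-- the 'for i in canChangeList: … if changedWord in targetList: return True' loop
def pvLoopA (nowL : List Char) (targetList : List String) (dotList : List Int) : List (List Char) → Option Bool
  | [] => some false
  | i :: rest =>
    match pvSubstA nowL dotList i with
    | none => none
    | some w => if targetList.contains (String.ofList w) then some true else pvLoopA nowL targetList dotList rest

def checkCanChange (now : String) (targetList : List String) (dotList : List Int) (canChange : String) (k : Int) : Bool :=
  let n : Int := PySem.Str.len now
  let L : Int := dotList.length
  let cnt1 : Int := targetList.foldl
    (fun c t => if PySem.Str.len t ≥ n ∧ PySem.Str.len t ≤ n - L + L * k then c + 1 else c) 0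
  if cnt1 ≤ 0 then false
  else
    let pieces := (PySem.Str.split? now ".").getD []   -- sep "." ≠ "", never none
    if pieces.length > 0 then
      let cnt2 : Int := pieces.foldl (fun c p => targetList.foldl (fun c' t => if PySem.Str.isIn p t then c' + 1 else c') c) 0
      if cnt2 ≤ 0 then false
      else
        match pvLoopA now.toList targetList dotList (pvProdRep canChange.toList dotList.length) with
        | some b => b
        | none => false   -- unreachable under Pre_ (IndexError in Python)
    else
      match pvLoopA now.toList targetList dotList (pvProdRep canChange.toList dotList.length) with
      | some b => b
      | none => false   -- unreachable under Pre_ (IndexError in Python)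

-- ===== PORT B =====
def checkCanChange_alt (now : String) (targetList : List String) (dotList : List Int) (canChange : String) (k : Int) : Bool :=
  let nowL := now.toList
  let n : Nat := nowL.length
  let L : Nat := dotList.length
  if !(targetList.any (fun t => decide ((n : Int) ≤ PySem.Str.len t ∧ PySem.Str.len t ≤ (n : Int) - L + L * k))) then false
  else if !(((PySem.Str.split? now ".").getD []).any (fun p => targetList.any (fun t => PySem.Str.isIn p t))) then false
  else
    let dots : PySem.Set Int := PySem.Set.ofList dotList
    let letters : PySem.Set Char := PySem.Set.ofList canChange.toList
    targetList.any (fun t =>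
      decide (t.toList.length = n) &&
      (List.range n).all (fun i =>
        if dots.contains (i : Int) then letters.contains (t.toList.getD i ' ')
        else t.toList.getD i ' ' == nowL.getD i ' '))

-- ===== PRECONDITION & SPEC =====
-- Pre_ restricts dotList to the natural domain of dot positions, [0, len(now)): outside it A either
-- raises IndexError (out-of-range index reached by the substitution loop) or its value comes from
-- Python's negative-index wraparound / the empty product, not from a dot position of `now`; inputs on
-- which either pre-filter fails are kept (both programs return False there whatever dotList holds).
def Pre_checkCanChange (now : String) (targetList : List String) (dotList : List Int) (canChange : String) (k : Int) : Prop :=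
  (∀ d ∈ dotList, 0 ≤ d ∧ d < now.toList.length) ∨
  (¬ ∃ t ∈ targetList, (now.toList.length : Int) ≤ PySem.Str.len t ∧
      PySem.Str.len t ≤ (now.toList.length : Int) - dotList.length + dotList.length * k) ∨
  (¬ ∃ p ∈ (PySem.Str.split? now ".").getD [], ∃ t ∈ targetList, PySem.Str.isIn p t = true)
instance (now : String) (targetList : List String) (dotList : List Int) (canChange : String) (k : Int) : Decidable (Pre_checkCanChange now targetList dotList canChange k) := by unfold Pre_checkCanChange; infer_instance

def pvWitness_checkCanChange : String × List String × List Int × String × Int := ("a.c", ["abc", "a.c"], [1], "b.", 1)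

def Spec_checkCanChange (now : String) (targetList : List String) (dotList : List Int) (canChange : String) (k : Int) (out : Bool) : Prop := out = checkCanChange_alt now targetList dotList canChange k
instance (now : String) (targetList : List String) (dotList : List Int) (canChange : String) (k : Int) (out : Bool) : Decidable (Spec_checkCanChange now targetList dotList canChange k out) := by unfold Spec_checkCanChange; infer_instance

-- ===== CLAIM (what is proved, stated in full; the proofs are below) =====
def Claim_equal_checkCanChange : Prop := ∀ (now : String) (targetList : List String) (dotList : List Int) (canChange : String) (k : Int), Dom_checkCanChange now targetList dotList canChange k → Pre_checkCanChange now targetList dotList canChange k → Spec_checkCanChange now targetList dotList canChange k (checkCanChange now targetList dotList canChange k)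

-- ===== LEMMAS AND PROOFS =====
-- proof-side helper: substitution over non-negative positions
def pvApply : List Char → List Nat → List Char → List Char
  | w, [], _ => w
  | w, _ :: _, [] => w
  | w, p :: ps, c :: cs => pvApply (w.set p c) ps cs

theorem pvSet_inrange (w : List Char) (d : Int) (c : Char)
    (h : 0 ≤ d ∧ d < w.length) :
    PySem.List.pySet? w d c = some (w.set d.toNat c) := by
  obtain ⟨h1, h2⟩ := h
  simp only [PySem.List.pySet?, PySem.List.pyIdx?]
  split_ifs <;> simp only [Option.map_some, Option.some.injEq] <;> (try congr 1) <;> omega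

theorem pvSubstA_eq (ds : List Int) (w : List Char) (i : List Char)
    (h : ∀ d ∈ ds, 0 ≤ d ∧ d < (w.length : Int)) :
    pvSubstA w ds i = some (pvApply w (ds.map Int.toNat) i) := by
  induction ds generalizing w i with
  | nil => simp [pvSubstA, pvApply]
  | cons d ds ih =>
    cases i with
    | nil => simp [pvSubstA, pvApply]
    | cons c cs =>
      have hd := h d (by simp)
      simp only [pvSubstA, pvSet_inrange w d c hd, List.map_cons, pvApply]
      have hlen : (w.set d.toNat c).length = w.length := by simp
      rw [ih (w.set d.toNat c) cs (by intro x hx; rw [hlen]; exact h x (by simp [hx]))]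

theorem pvLoopA_eq (nowL : List Char) (targets : List String) (ds : List Int)
    (h : ∀ d ∈ ds, 0 ≤ d ∧ d < (nowL.length : Int)) (tuples : List (List Char)) :
    pvLoopA nowL targets ds tuples =
      some (tuples.any (fun i => targets.contains (String.ofList (pvApply nowL (ds.map Int.toNat) i)))) := by
  induction tuples with
  | nil => simp [pvLoopA]
  | cons i rest ih =>
    simp only [pvLoopA, pvSubstA_eq ds nowL i h, List.any_cons]
    by_cases hc : String.ofList (pvApply nowL (ds.map Int.toNat) i) ∈ targets <;>
      simp [hc, ih]

theorem pvListExt (t w : List Char) :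
    t = w ↔ (t.length = w.length ∧ ∀ j < w.length, t.getD j ' ' = w.getD j ' ') := by
  constructor
  · rintro rfl; simp
  · rintro ⟨hl, hj⟩
    apply List.ext_getElem hl
    intro j h1 h2
    have := hj j h2
    simpa [List.getD_eq_getElem?_getD, List.getElem?_eq_getElem, h1, h2] using this

theorem pvImage (cs : List Char) (nds : List Nat) (w t : List Char)
    (h : ∀ p ∈ nds, p < w.length) :
    (∃ i ∈ pvProdRep cs nds.length, pvApply w nds i = t) ↔
      (t.length = w.length ∧ ∀ j < w.length,
        if j ∈ nds then t.getD j ' ' ∈ cs else t.getD j ' ' = w.getD j ' ') := by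
  induction nds generalizing w t with
  | nil =>
    simp only [List.length_nil, pvProdRep, List.mem_singleton]
    constructor
    · rintro ⟨i, rfl, rfl⟩; simp [pvApply]
    · rintro hr
      exact ⟨[], rfl, by simp [pvApply, (pvListExt t w).mpr ⟨hr.1, fun j hj => hr.2 j hj⟩]⟩
  | cons p ps ih =>
    have hp : p < w.length := h p (by simp)
    have step : (∃ i ∈ pvProdRep cs (p :: ps).length, pvApply w (p :: ps) i = t) ↔
        ∃ c ∈ cs, ∃ i ∈ pvProdRep cs ps.length, pvApply (w.set p c) ps i = t := by
      simp only [List.length_cons, pvProdRep, List.mem_flatMap, List.mem_map]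
      constructor
      · rintro ⟨i, ⟨c, hc, i', hi', rfl⟩, happ⟩
        exact ⟨c, hc, i', hi', happ⟩
      · rintro ⟨c, hc, i', hi', happ⟩
        exact ⟨c :: i', ⟨c, hc, i', hi', rfl⟩, happ⟩
    rw [step]
    have hset : ∀ c : Char, ∀ j, j < w.length →
        (w.set p c).getD j ' ' = if p = j then c else w.getD j ' ' := by
      intro c j hj
      simp only [List.getD_eq_getElem?_getD, List.getElem?_set]
      split_ifs with h1 <;> simp [hj]
    constructor
    · rintro ⟨c, hc, hmem⟩
      rw [ih (w.set p c) t (by intro q hq; simpa using h q (by simp [hq]))] at hmem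
      obtain ⟨hl, hall⟩ := hmem
      rw [List.length_set] at hl
      refine ⟨hl, ?_⟩
      intro j hj
      have hj2 := hall j (by simpa using hj)
      by_cases hmem2 : j ∈ p :: ps
      · rw [if_pos hmem2]
        by_cases hjps : j ∈ ps
        · rw [if_pos hjps] at hj2; exact hj2
        · have hjp : j = p := by
            rcases List.mem_cons.mp hmem2 with hh | hh
            · exact hh
            · exact (hjps hh).elim
          subst hjp
          rw [if_neg hjps, hset c j hj, if_pos rfl] at hj2
          rw [hj2]; exact hc
      · rw [if_neg hmem2]
        have hjps : j ∉ ps := fun hh => hmem2 (by simp [hh])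
        have hjp : j ≠ p := fun hh => hmem2 (by simp [hh])
        rw [if_neg hjps, hset c j hj, if_neg (fun hh : p = j => hjp hh.symm)] at hj2
        exact hj2
    · rintro ⟨hl, hall⟩
      have hpc : t.getD p ' ' ∈ cs := by
        have := hall p hp
        rw [if_pos (by simp)] at this
        exact this
      refine ⟨t.getD p ' ', hpc, ?_⟩
      rw [ih (w.set p (t.getD p ' ')) t (by intro q hq; simpa using h q (by simp [hq]))]
      refine ⟨by simpa using hl, ?_⟩
      intro j hj
      rw [List.length_set] at hj
      by_cases hjps : j ∈ ps
      · rw [if_pos hjps]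
        have := hall j hj
        rw [if_pos (by simp [hjps])] at this
        exact this
      · rw [if_neg hjps, hset (t.getD p ' ') j hj]
        by_cases hjp : p = j
        · subst hjp; simp
        · rw [if_neg hjp]
          have := hall j hj
          rw [if_neg (by simp only [List.mem_cons, not_or]; exact ⟨fun hh => hjp hh.symm, hjps⟩)] at this
          exact this

theorem pvCnt1 (tl : List String) (p : String → Bool) :
    (tl.foldl (fun c t => if p t then c + 1 else c) (0 : Int) ≤ 0) ↔ tl.any p = false := by
  rw [PySem.List.foldl_count_if p tl 0]
  simp only [zero_add]
  constructor
  · intro hle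
    have : tl.countP p = 0 := by omega
    rw [List.any_eq_false]
    intro t ht
    exact fun hp => by simp [List.countP_eq_zero.mp this t ht] at hp
  · intro hany
    have : tl.countP p = 0 := List.countP_eq_zero.mpr (by
      intro t ht
      exact fun hp => by rw [List.any_eq_false] at hany; exact hany t ht hp)
    omega

theorem pvCnt2 (tl : List String) (pieces : List String) :
    (pieces.foldl (fun c p => tl.foldl (fun c' t => if PySem.Str.isIn p t then c' + 1 else c') c) (0 : Int) ≤ 0) ↔
      (pieces.any (fun p => tl.any (fun t => PySem.Str.isIn p t))) = false := by
  have hfold : ∀ (ps : List String) (a : Int),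
      ps.foldl (fun c p => tl.foldl (fun c' t => if PySem.Str.isIn p t then c' + 1 else c') c) a =
        a + ((ps.map (fun p => ((tl.countP (fun t => PySem.Str.isIn p t) : Nat) : Int))).sum) := by
    intro ps
    induction ps with
    | nil => simp
    | cons q qs ih =>
      intro a
      simp only [List.foldl_cons, List.map_cons, List.sum_cons]
      rw [PySem.List.foldl_count_if (fun t => PySem.Str.isIn q t) tl a, ih]
      ring
  rw [hfold, zero_add]
  have hcast : ((pieces.map (fun p => ((tl.countP (fun t => PySem.Str.isIn p t) : Nat) : Int))).sum) =
      (((pieces.map (fun p => tl.countP (fun t => PySem.Str.isIn p t))).sum : Nat) : Int) := by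
    induction pieces with
    | nil => simp
    | cons q qs ih =>
      simp only [List.map_cons, List.sum_cons, ih]
      push_cast
      ring
  rw [hcast]
  constructor
  · intro hle
    have h0 : (pieces.map (fun p => tl.countP (fun t => PySem.Str.isIn p t))).sum = 0 := by omega
    rw [List.any_eq_false]
    intro q hq hqt
    rw [List.sum_eq_zero_iff_forall_eq_nat] at h0
    have hz := h0 _ (List.mem_map_of_mem hq)
    rw [List.countP_eq_zero] at hz
    rw [List.any_eq_true] at hqt
    obtain ⟨t, ht, hp⟩ := hqt
    exact hz t ht hp
  · intro hany
    have h0 : (pieces.map (fun p => tl.countP (fun t => PySem.Str.isIn p t))).sum = 0 := by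
      rw [List.sum_eq_zero_iff_forall_eq_nat]
      intro x hx
      rw [List.mem_map] at hx
      obtain ⟨q, hq, rfl⟩ := hx
      rw [List.countP_eq_zero]
      intro t ht hp
      rw [List.any_eq_false] at hany
      exact hany q hq (by rw [List.any_eq_true]; exact ⟨t, ht, hp⟩)
    omega

theorem pvCnt1' (tl : List String) (P : String → Prop) [DecidablePred P] :
    (tl.foldl (fun c t => if P t then c + 1 else c) (0 : Int) ≤ 0) ↔
      (tl.any fun t => decide (P t)) = false := by
  have h : (fun (c : Int) t => if P t then c + 1 else c) =
      (fun (c : Int) t => if (fun t => decide (P t)) t then c + 1 else c) := by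
    funext c t
    by_cases hP : P t <;> simp [hP]
  rw [h, pvCnt1]

theorem pvMain (nowL : List Char) (tl : List String) (dl : List Int) (cs : List Char)
    (h : ∀ d ∈ dl, 0 ≤ d ∧ d < (nowL.length : Int)) :
    ((pvProdRep cs dl.length).any
        (fun i => tl.contains (String.ofList (pvApply nowL (dl.map Int.toNat) i))))
      = tl.any (fun t =>
          decide (t.toList.length = nowL.length) &&
          (List.range nowL.length).all (fun j =>
            if (PySem.Set.ofList dl).contains (j : Int)
            then (PySem.Set.ofList cs).contains (t.toList.getD j ' ')
            else t.toList.getD j ' ' == nowL.getD j ' ')) := by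
  rw [Bool.eq_iff_iff]
  simp only [List.any_eq_true, List.contains_eq_mem, decide_eq_true_eq, Bool.and_eq_true,
    List.all_eq_true, List.mem_range]
  have hnds : ∀ p ∈ dl.map Int.toNat, p < nowL.length := by
    intro p hp
    rw [List.mem_map] at hp
    obtain ⟨d, hd, rfl⟩ := hp
    have := h d hd
    omega
  have hlen : dl.length = (dl.map Int.toNat).length := by simp
  have hposmem : ∀ j : Nat,
      ((PySem.Set.ofList dl).contains (j : Int) = true) ↔ j ∈ dl.map Int.toNat := by
    intro j
    rw [PySem.Set.contains_iff, PySem.Set.mem_ofList, List.mem_map]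
    constructor
    · rintro hj
      refine ⟨(j : Int), hj, by simp⟩
    · rintro ⟨d, hd, rfl⟩
      have := h d hd
      have : ((d.toNat : Nat) : Int) = d := by omega
      rwa [this]
  constructor
  · rintro ⟨i, hi, hmem⟩
    refine ⟨_, hmem, ?_⟩
    have himg : ∃ i' ∈ pvProdRep cs (dl.map Int.toNat).length,
        pvApply nowL (dl.map Int.toNat) i' =
          (String.ofList (pvApply nowL (dl.map Int.toNat) i)).toList := by
      exact ⟨i, by rwa [← hlen], by simp⟩
    rw [pvImage cs _ nowL _ hnds] at himg
    obtain ⟨hl, hall⟩ := himg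
    refine ⟨hl, ?_⟩
    intro j hj
    have hthis := hall j hj
    by_cases hjm : (PySem.Set.ofList dl).contains (j : Int) = true
    · rw [if_pos hjm]
      rw [hposmem] at hjm
      rw [if_pos hjm] at hthis
      rw [PySem.Set.contains_iff, PySem.Set.mem_ofList]
      exact hthis
    · rw [if_neg hjm]
      have hjm2 : j ∉ dl.map Int.toNat := fun hh => hjm ((hposmem j).mpr hh)
      rw [if_neg hjm2] at hthis
      exact beq_iff_eq.mpr hthis
  · rintro ⟨t, ht, hlt, hall⟩
    have himg : ∃ i ∈ pvProdRep cs (dl.map Int.toNat).length,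
        pvApply nowL (dl.map Int.toNat) i = t.toList := by
      rw [pvImage cs _ nowL _ hnds]
      refine ⟨hlt, ?_⟩
      intro j hj
      have hthis := hall j hj
      by_cases hjm : j ∈ dl.map Int.toNat
      · rw [if_pos hjm]
        rw [← hposmem] at hjm
        rw [if_pos hjm, PySem.Set.contains_iff, PySem.Set.mem_ofList] at hthis
        exact hthis
      · rw [if_neg hjm]
        rw [if_neg (fun hc => hjm ((hposmem j).mp hc))] at hthis
        exact eq_of_beq hthis
    obtain ⟨i, hi, happ⟩ := himg
    refine ⟨i, by rwa [← hlen] at hi, ?_⟩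
    rw [happ, String.ofList_toList]
    exact ht

theorem pvSplitGo_ne_nil (sep : List Char) (fuel : Nat) (l cur : List Char) (acc : List (List Char)) :
    PySem.Chars.splitOn.go sep fuel l cur acc ≠ [] := by
  induction fuel generalizing l cur acc with
  | zero => simp [PySem.Chars.splitOn.go]
  | succ fuel ih =>
    cases l with
    | nil => simp [PySem.Chars.splitOn.go]
    | cons c rest =>
      rw [PySem.Chars.splitOn.go]
      split_ifs <;> exact ih _ _ _

theorem pvPieces_ne_nil (now : String) : (PySem.Str.split? now ".").getD [] ≠ [] := by
  simp only [PySem.Str.split?, PySem.Chars.split?]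
  have : (".".toList.isEmpty) = false := by decide
  rw [this]
  simp only [Bool.false_eq_true, if_false, Option.map_some, Option.getD_some, ne_eq,
    List.map_eq_nil_iff]
  exact pvSplitGo_ne_nil _ _ _ _ _

-- ===== VERDICT (by name: the statement is the Claim_ definition above) =====
theorem checkCanChange_spec : Claim_equal_checkCanChange := by
  intro now tl dl cc k _ hpre
  unfold Spec_checkCanChange checkCanChange checkCanChange_alt
  dsimp only
  rw [if_pos (List.length_pos_of_ne_nil (pvPieces_ne_nil now))]
  simp only [pvCnt1', pvCnt2, Bool.not_eq_true']
  have hAB : (fun t => decide (PySem.Str.len t ≥ PySem.Str.len now ∧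
        PySem.Str.len t ≤ PySem.Str.len now - (dl.length : Int) + (dl.length : Int) * k))
      = (fun t => decide (((now.toList.length : Nat) : Int) ≤ PySem.Str.len t ∧
        PySem.Str.len t ≤ ((now.toList.length : Nat) : Int) - (dl.length : Int) + (dl.length : Int) * k)) := by
    funext t
    exact decide_eq_decide.mpr (by simp [PySem.Str.len_eq, ge_iff_le])
  rw [hAB]
  split_ifs with h1 h2
  · rfl
  · rfl
  · -- main case: both pre-filters pass; Pre_ then gives every dot index in [0, len(now))
    rw [Bool.not_eq_false] at h1 h2
    have hrange : ∀ d ∈ dl, 0 ≤ d ∧ d < (now.toList.length : Int) := by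
      rcases hpre with h | h | h
      · intro d hd; exact ⟨(h d hd).1, (h d hd).2⟩
      · exfalso
        rw [List.any_eq_true] at h1
        obtain ⟨t, ht, hp⟩ := h1
        rw [decide_eq_true_eq] at hp
        exact h ⟨t, ht, hp⟩
      · exfalso
        rw [List.any_eq_true] at h2
        obtain ⟨p, hp, hany⟩ := h2
        rw [List.any_eq_true] at hany
        obtain ⟨t, ht, hin⟩ := hany
        exact h ⟨p, hp, t, ht, hin⟩
    rw [pvLoopA_eq now.toList tl dl hrange (pvProdRep cc.toList dl.length)]
    exact pvMain now.toList tl dl cc.toList hrange
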